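-- pv_equiv track=rewrite | github.com/KKBalta/slaughterhouse_system | labeling/utils.py | _format_prn_for_bat
-- ===== SOURCE A (Python) =====
-- def _format_prn_for_bat(prn_commands: str) -> str:
--     """
--     Format PRN commands for inclusion in BAT file.
--     Each line needs to be prefixed with 'echo ' for BAT file.
--     """
--     lines = prn_commands.strip().split('\n')
--     formatted_lines = []
--
--     for line in lines:
--         line = line.strip()
--         if line:  # Skip empty lines
--             # Escape special characters for batch files
--             # Use ^ to escape special characters instead of doubling quotes
--             line = line.replace('%', '%%')  # Escape percent signs
--             line = line.replace('^', '^^')  # Escape caret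
--             line = line.replace('&', '^&')  # Escape ampersand
--             line = line.replace('|', '^|')  # Escape pipe
--             line = line.replace('<', '^<')  # Escape less than
--             line = line.replace('>', '^>')  # Escape greater than
--
--             # For echo commands with quotes, use a different approach
--             if '"' in line:
--                 # Use echo with quotes around the entire line
--                 formatted_lines.append(f'echo {line}')
--             else:
--                 formatted_lines.append(f'echo {line}')
--
--     return '\n'.join(formatted_lines)
-- ===== SOURCE B (Python) =====
-- def _format_prn_for_bat(prn_commands: str) -> str:
--     # Single pass over the characters: a small state machine that strips,
--     # splits, escapes and prefixes in one traversal (no per-line replace chains).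
--     escapes = {'%': '%%', '^': '^^', '&': '^&', '|': '^|', '<': '^<', '>': '^>'}
--     out = []    # finished 'echo ...' lines
--     line = ''   # escaped content of the current line, already left-stripped
--     ws = ''     # pending whitespace run (internal if more content follows, else dropped)
--     for ch in prn_commands.strip() + '\n':
--         if ch == '\n':
--             if line:
--                 out.append('echo ' + line)
--             line = ws = ''
--         elif ch.isspace():
--             if line:
--                 ws += ch
--         else:
--             line += ws + escapes.get(ch, ch)
--             ws = ''
--     return '\n'.join(out)
-- ===== Notes on version B (the rewrite author's own statement) =====
-- stated objective: alternative
-- what changed: Replaces A's staged pipeline (outer strip, split on newlines, per-line strip plus six chained replace() scans, accumulator list, join) by a single left-to-right character scan: a small state machine with a current-line buffer and a pending-whitespace run that strips, splits, escapes and prefixes each kept line in one traversal of the input.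
import Mathlib
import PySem

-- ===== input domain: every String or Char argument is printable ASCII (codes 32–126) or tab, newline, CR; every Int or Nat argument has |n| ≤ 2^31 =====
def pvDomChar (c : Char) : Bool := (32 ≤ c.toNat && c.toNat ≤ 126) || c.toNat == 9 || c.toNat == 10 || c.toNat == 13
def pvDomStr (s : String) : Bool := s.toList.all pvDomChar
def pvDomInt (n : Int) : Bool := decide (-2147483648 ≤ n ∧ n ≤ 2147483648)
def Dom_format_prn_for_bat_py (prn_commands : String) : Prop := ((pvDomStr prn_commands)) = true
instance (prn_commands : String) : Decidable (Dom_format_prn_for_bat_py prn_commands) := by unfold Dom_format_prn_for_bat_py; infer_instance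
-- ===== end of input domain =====

-- B replaces A's staged pipeline (strip, split('\n'), per-line six chained replaces,
-- accumulator, join) by a single character-level state machine (objective: alternative).

-- ===== PORT A =====
-- A: strip, split on '\n', loop with accumulator; per kept line six chained replaces, then 'echo ' prefix.
def format_prn_for_bat_py (prn_commands : String) : String :=
  let lines := PySem.Chars.splitOn (PySem.Chars.strip prn_commands.toList) ['\n']
  let formatted_lines := lines.foldl (fun acc line =>
    let line := PySem.Chars.strip line
    if line.isEmpty then acc
    else
      let line := PySem.Chars.replace line ['%'] ['%','%']
      let line := PySem.Chars.replace line ['^'] ['^','^']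
      let line := PySem.Chars.replace line ['&'] ['^','&']
      let line := PySem.Chars.replace line ['|'] ['^','|']
      let line := PySem.Chars.replace line ['<'] ['^','<']
      let line := PySem.Chars.replace line ['>'] ['^','>']
      -- A's '"' test chooses between two identical branches; kept faithfully
      if PySem.Chars.isIn ['"'] line then acc ++ [('e'::'c'::'h'::'o'::' '::[]) ++ line]
      else acc ++ [('e'::'c'::'h'::'o'::' '::[]) ++ line]) []
  String.ofList (PySem.Chars.join ['\n'] formatted_lines)

-- ===== PORT B =====
-- escapes.get(ch, ch) of Source B
def batEsc (c : Char) : List Char :=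
  if c = '%' then ['%','%']
  else if c = '^' then ['^','^']
  else if c = '&' then ['^','&']
  else if c = '|' then ['^','|']
  else if c = '<' then ['^','<']
  else if c = '>' then ['^','>']
  else [c]

-- the loop body of Source B: state = (out, line, ws)
def stepB (st : List (List Char) × List Char × List Char) (c : Char) :
    List (List Char) × List Char × List Char :=
  if c = '\n' then
    if st.2.1.isEmpty then (st.1, [], [])
    else (st.1 ++ [('e'::'c'::'h'::'o'::' '::[]) ++ st.2.1], [], [])
  else if PySem.Chars.isspace c then
    if st.2.1.isEmpty then st else (st.1, st.2.1, st.2.2 ++ [c])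
  else (st.1, st.2.1 ++ st.2.2 ++ batEsc c, [])

def format_prn_for_bat_py_alt (prn_commands : String) : String :=
  let st := (PySem.Chars.strip prn_commands.toList ++ ['\n']).foldl stepB ([], [], [])
  String.ofList (PySem.Chars.join ['\n'] st.1)

-- ===== PRECONDITION & SPEC =====
def Spec_format_prn_for_bat_py (prn_commands : String) (out : String) : Prop := out = format_prn_for_bat_py_alt prn_commands
instance (prn_commands : String) (out : String) : Decidable (Spec_format_prn_for_bat_py prn_commands out) := by unfold Spec_format_prn_for_bat_py; infer_instance

-- ===== CLAIM (what is proved, stated in full; the proofs are below) =====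
def Claim_equal_format_prn_for_bat_py : Prop := ∀ (prn_commands : String), Dom_format_prn_for_bat_py prn_commands → Spec_format_prn_for_bat_py prn_commands (format_prn_for_bat_py prn_commands)

-- ===== LEMMAS AND PROOFS =====

-- ---- A-side: the six chained single-char replaces are a per-character flatMap ----
theorem replace_go_single (a : Char) (r : List Char) :
    ∀ (fuel : Nat) (l acc : List Char), l.length ≤ fuel →
      PySem.Chars.replace.go [a] r fuel l acc
        = acc.reverse ++ l.flatMap (fun c => if c = a then r else [c]) := by
  intro fuel
  induction fuel with
  | zero =>
    intro l acc h
    have : l = [] := List.eq_nil_of_length_eq_zero (Nat.le_zero.mp h)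
    subst this
    simp [PySem.Chars.replace.go]
  | succ n ih =>
    intro l acc h
    cases l with
    | nil => simp [PySem.Chars.replace.go]
    | cons c t =>
      simp only [PySem.Chars.replace.go]
      by_cases hc : c = a
      · subst hc
        have hp : List.isPrefixOf [c] (c :: t) = true := by
          simp [List.isPrefixOf]
        rw [if_pos hp]
        simp only [List.length_cons, List.length_nil, List.drop]
        rw [ih t (r.reverse ++ acc) (Nat.le_of_succ_le_succ h)]
        simp
      · have hp : List.isPrefixOf [a] (c :: t) = false := by
          simp [List.isPrefixOf]
          exact fun e => absurd e.symm hc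
        rw [if_neg (by simp [hp])]
        rw [ih t (c :: acc) (Nat.le_of_succ_le_succ h)]
        simp [hc]

theorem replace_single (a : Char) (r l : List Char) :
    PySem.Chars.replace l [a] r = l.flatMap (fun c => if c = a then r else [c]) := by
  rw [PySem.Chars.replace]
  simp only [List.isEmpty_cons, Bool.false_eq_true, if_false]
  simpa using replace_go_single a r l.length l [] (le_refl _)

theorem chain_eq_flatMap_batEsc (l : List Char) :
    PySem.Chars.replace (PySem.Chars.replace (PySem.Chars.replace (PySem.Chars.replace
      (PySem.Chars.replace (PySem.Chars.replace l ['%'] ['%','%']) ['^'] ['^','^'])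
      ['&'] ['^','&']) ['|'] ['^','|']) ['<'] ['^','<']) ['>'] ['^','>']
    = l.flatMap batEsc := by
  simp only [replace_single, List.flatMap_assoc]
  apply List.flatMap_congr
  intro c _
  by_cases h1 : c = '%' <;> by_cases h2 : c = '^' <;> by_cases h3 : c = '&' <;>
    by_cases h4 : c = '|' <;> by_cases h5 : c = '<' <;> by_cases h6 : c = '>' <;>
    simp_all [batEsc]

theorem foldl_skip_append {α β : Type} (p : α → Bool) (f : α → β) (l : List α) (acc : List β) :
    l.foldl (fun acc x => if p x then acc else acc ++ [f x]) acc
      = acc ++ (l.filter (fun x => !p x)).map f := by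
  induction l generalizing acc with
  | nil => simp
  | cons x xs ih => by_cases h : p x <;> simp [h, ih]

-- ---- splitOn ['\n'] is the simple newline split ----
def nlSplit : List Char → List (List Char)
  | [] => [[]]
  | c :: r => if c = '\n' then [] :: nlSplit r else (nlSplit r).modifyHead (c :: ·)

theorem nlSplit_ne_nil (l : List Char) : nlSplit l ≠ [] := by
  cases l with
  | nil => simp [nlSplit]
  | cons c r =>
    simp only [nlSplit]
    split_ifs
    · simp
    · cases h : nlSplit r with
      | nil => exact absurd h (nlSplit_ne_nil r)
      | cons a t => simp [List.modifyHead]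

theorem splitOn_go_nl' :
    ∀ (fuel : Nat) (l cur : List Char) (acc : List (List Char)), l.length < fuel →
      PySem.Chars.splitOn.go ['\n'] fuel l cur acc
        = acc.reverse ++ (nlSplit l).modifyHead (cur.reverse ++ ·) := by
  intro fuel
  induction fuel with
  | zero => intro l cur acc h; omega
  | succ n ih =>
    intro l cur acc h
    cases l with
    | nil => simp [PySem.Chars.splitOn.go, nlSplit]
    | cons c t =>
      simp only [PySem.Chars.splitOn.go]
      by_cases hc : c = '\n'
      · subst hc
        have hp : List.isPrefixOf ['\n'] ('\n' :: t) = true := by simp [List.isPrefixOf]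
        rw [if_pos hp]
        simp only [List.length_cons, List.length_nil, List.drop]
        rw [ih t [] (cur.reverse :: acc) (by simpa using Nat.lt_of_succ_lt_succ h)]
        cases hnl : nlSplit t with
        | nil => exact absurd hnl (nlSplit_ne_nil t)
        | cons a b => simp [nlSplit, hnl]
      · have hp : List.isPrefixOf ['\n'] (c :: t) = false := by
          simp [List.isPrefixOf]; exact fun e => absurd e.symm hc
        rw [if_neg (by simp [hp])]
        rw [ih t (c :: cur) acc (by simpa using Nat.lt_of_succ_lt_succ h)]
        cases hnl : nlSplit t with
        | nil => exact absurd hnl (nlSplit_ne_nil t)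
        | cons a b => simp [nlSplit, hc, hnl, List.modifyHead]

theorem splitOn_eq_nlSplit (l : List Char) :
    PySem.Chars.splitOn l ['\n'] = nlSplit l := by
  rw [PySem.Chars.splitOn, splitOn_go_nl' (l.length + 1) l [] [] (Nat.lt_succ_self _)]
  cases hnl : nlSplit l with
  | nil => exact absurd hnl (nlSplit_ne_nil l)
  | cons a b => simp [List.modifyHead]

-- ---- B-side: characterisation of the one-pass scan ----
theorem batEsc_ne_nil (c : Char) : batEsc c ≠ [] := by
  unfold batEsc; split_ifs <;> simp

theorem flatMap_batEsc_eq_nil_iff (l : List Char) : l.flatMap batEsc = [] ↔ l = [] := by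
  cases l with
  | nil => simp
  | cons c t => simp [List.flatMap_cons, batEsc_ne_nil]

theorem batEsc_of_isspace {c : Char} (h : PySem.Chars.isspace c = true) : batEsc c = [c] := by
  unfold batEsc
  split_ifs with h1 h2 h3 h4 h5 h6 <;>
    first
      | rfl
      | (first | subst h1 | subst h2 | subst h3 | subst h4 | subst h5 | subst h6
         exact absurd h (by decide))

theorem flatMap_batEsc_of_ws {t : List Char} (h : ∀ c ∈ t, PySem.Chars.isspace c = true) :
    t.flatMap batEsc = t := by
  induction t with
  | nil => rfl
  | cons c r ih =>
    simp only [List.flatMap_cons, batEsc_of_isspace (h c (by simp)),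
      ih (fun x hx => h x (by simp [hx]))]
    rfl

theorem dropWhile_eq_cons_false {α : Type} (p : α → Bool) :
    ∀ (l : List α) (c : α) (r : List α), List.dropWhile p l = c :: r → p c = false := by
  intro l
  induction l with
  | nil => intro c r h; simp at h
  | cons x t ih =>
    intro c r h
    rw [List.dropWhile_cons] at h
    by_cases hp : p x
    · rw [if_pos hp] at h; exact ih c r h
    · rw [if_neg hp] at h
      obtain ⟨h1, _⟩ := List.cons.injEq .. ▸ h
      cases h
      simpa using hp

theorem rstrip_ne_nil_of_head {c : Char} (r : List Char)
    (h : PySem.Chars.isspace c = false) : PySem.Chars.rstrip (c :: r) ≠ [] := by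
  simp only [PySem.Chars.rstrip, List.reverse_cons, List.dropWhile_append, ne_eq,
    List.reverse_eq_nil_iff]
  split_ifs with he
  · simp [List.dropWhile, h]
  · simp

theorem strip_eq_nil_iff (a : List Char) :
    PySem.Chars.strip a = [] ↔ PySem.Chars.lstrip a = [] := by
  constructor
  · intro h
    by_contra hne
    cases hl : PySem.Chars.lstrip a with
    | nil => exact hne hl
    | cons c r =>
      have hc : PySem.Chars.isspace c = false :=
        dropWhile_eq_cons_false _ a c r (by simpa [PySem.Chars.lstrip] using hl)
      exact rstrip_ne_nil_of_head r hc (by simpa [PySem.Chars.strip, hl] using h)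
  · intro h
    simp [PySem.Chars.strip, h, PySem.Chars.rstrip]

theorem rstrip_append_ws {c : Char} (x : List Char) (h : PySem.Chars.isspace c = true) :
    PySem.Chars.rstrip (x ++ [c]) = PySem.Chars.rstrip x := by
  simp [PySem.Chars.rstrip, h]

theorem rstrip_append_nonws {c : Char} (x : List Char) (h : PySem.Chars.isspace c = false) :
    PySem.Chars.rstrip (x ++ [c]) = x ++ [c] := by
  simp [PySem.Chars.rstrip, h]

theorem scan_no_nl : ∀ (a : List Char), '\n' ∉ a → ∀ out : List (List Char),
    ∃ t, (a.foldl stepB (out, [], [])) = (out, (PySem.Chars.strip a).flatMap batEsc, t)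
      ∧ PySem.Chars.lstrip a = PySem.Chars.strip a ++ t
      ∧ ∀ c ∈ t, PySem.Chars.isspace c = true := by
  intro a
  induction a using List.reverseRecOn with
  | nil =>
    intro _ out
    exact ⟨[], by simp [PySem.Chars.strip, PySem.Chars.lstrip, PySem.Chars.rstrip]⟩
  | append_singleton a c ih =>
    intro hnl out
    have hca : '\n' ∉ a := fun h => hnl (by simp [h])
    have hcn : c ≠ '\n' := fun h => hnl (by simp [h])
    obtain ⟨t, hst, hdec, hws⟩ := ih hca out
    rw [List.foldl_append, hst, List.foldl_cons, List.foldl_nil]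
    by_cases h0 : PySem.Chars.lstrip a = []
    · have hs0 : PySem.Chars.strip a = [] := (strip_eq_nil_iff a).mpr h0
      have ht0 : t = [] := by simpa [hs0, h0] using hdec.symm
      subst ht0
      by_cases hwc : PySem.Chars.isspace c = true
      · refine ⟨[], ?_⟩
        have hl : PySem.Chars.lstrip (a ++ [c]) = [] := by
          simp [PySem.Chars.lstrip, List.dropWhile_append,
            (by simpa [PySem.Chars.lstrip] using h0 : List.dropWhile PySem.Chars.isspace a = []),
            List.dropWhile, hwc]
        have hs : PySem.Chars.strip (a ++ [c]) = [] := (strip_eq_nil_iff _).mpr hl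
        simp [stepB, hcn, hwc, hs0, hs, hl]
      · refine ⟨[], ?_⟩
        have hl : PySem.Chars.lstrip (a ++ [c]) = [c] := by
          simp [PySem.Chars.lstrip, List.dropWhile_append,
            (by simpa [PySem.Chars.lstrip] using h0 : List.dropWhile PySem.Chars.isspace a = []),
            List.dropWhile, hwc]
        have hs : PySem.Chars.strip (a ++ [c]) = [c] := by
          simp only [PySem.Chars.strip, hl]
          simpa using rstrip_append_nonws ([]) (by simpa using hwc)
        simp [stepB, hcn, hwc, hs0, hs, hl, batEsc]
    · have hs0 : PySem.Chars.strip a ≠ [] := fun h => h0 ((strip_eq_nil_iff a).mp h)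
      have hE : (PySem.Chars.strip a).flatMap batEsc ≠ [] :=
        fun h => hs0 ((flatMap_batEsc_eq_nil_iff _).mp h)
      have hl : PySem.Chars.lstrip (a ++ [c]) = PySem.Chars.lstrip a ++ [c] := by
        simp only [PySem.Chars.lstrip] at h0 ⊢
        rw [List.dropWhile_append, if_neg (by simpa [List.isEmpty_iff] using h0)]
      by_cases hwc : PySem.Chars.isspace c = true
      · have hs : PySem.Chars.strip (a ++ [c]) = PySem.Chars.strip a := by
          simp only [PySem.Chars.strip, hl]
          exact rstrip_append_ws _ hwc
        refine ⟨t ++ [c], ?_, ?_, ?_⟩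
        · simp [stepB, hcn, hwc, List.isEmpty_iff, hE, hs]
        · rw [hl, hs, hdec]; simp
        · intro x hx
          rcases List.mem_append.mp hx with h | h
          · exact hws x h
          · simp at h; subst h; exact hwc
      · have hs : PySem.Chars.strip (a ++ [c]) = PySem.Chars.strip a ++ t ++ [c] := by
          rw [PySem.Chars.strip, hl, hdec,
            rstrip_append_nonws _ (by simpa using hwc)]
        refine ⟨[], ?_, ?_, by simp⟩
        · simp only [stepB, if_neg hcn, hwc, Bool.false_eq_true, if_false, hs,
            List.isEmpty_iff, hE, List.flatMap_append, flatMap_batEsc_of_ws hws]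
          simp [List.flatMap_cons]
        · rw [hl, hdec, hs]; simp

-- formatted output of a list of raw lines
def fmtLines (lines : List (List Char)) : List (List Char) :=
  ((lines.map PySem.Chars.strip).filter (fun x => !x.isEmpty)).map
    (fun a => ('e'::'c'::'h'::'o'::' '::[]) ++ a.flatMap batEsc)

theorem fmtLines_cons (a : List Char) (X : List (List Char)) :
    fmtLines (a :: X)
      = (if (PySem.Chars.strip a).isEmpty then []
         else [('e'::'c'::'h'::'o'::' '::[]) ++ (PySem.Chars.strip a).flatMap batEsc])
        ++ fmtLines X := by
  by_cases h : (PySem.Chars.strip a).isEmpty <;> simp [fmtLines, h]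

theorem nlSplit_no_mem {l : List Char} (h : '\n' ∉ l) : nlSplit l = [l] := by
  induction l with
  | nil => rfl
  | cons c r ih =>
    have hc : c ≠ '\n' := fun e => h (by simp [e])
    have hr : '\n' ∉ r := fun e => h (by simp [e])
    simp [nlSplit, hc, ih hr, List.modifyHead]

theorem nlSplit_append {a : List Char} (r : List Char) (h : '\n' ∉ a) :
    nlSplit (a ++ '\n' :: r) = a :: nlSplit r := by
  induction a with
  | nil => simp [nlSplit]
  | cons c a' ih =>
    have hc : c ≠ '\n' := fun e => h (by simp [e])
    have ha : '\n' ∉ a' := fun e => h (by simp [e])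
    simp [nlSplit, hc, ih ha, List.modifyHead]

theorem scan_line_flush (a : List Char) (h : '\n' ∉ a) (out : List (List Char)) :
    (a ++ ['\n']).foldl stepB (out, [], []) = (out ++ fmtLines [a], [], []) := by
  obtain ⟨t, hst, _, _⟩ := scan_no_nl a h out
  rw [List.foldl_append, hst, List.foldl_cons, List.foldl_nil]
  by_cases he : (PySem.Chars.strip a).isEmpty
  · have : (PySem.Chars.strip a).flatMap batEsc = [] := by
      simp [List.isEmpty_iff] at he; simp [he]
    simp [stepB, this, fmtLines, he]
  · have : (PySem.Chars.strip a).flatMap batEsc ≠ [] := by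
      simp only [List.isEmpty_iff] at he
      exact fun hx => he ((flatMap_batEsc_eq_nil_iff _).mp hx)
    simp [stepB, List.isEmpty_iff, this, fmtLines, he]

theorem scan_main : ∀ (n : Nat) (l : List Char), l.length ≤ n → ∀ out : List (List Char),
    (l ++ ['\n']).foldl stepB (out, [], []) = (out ++ fmtLines (nlSplit l), [], []) := by
  intro n
  induction n with
  | zero =>
    intro l hl out
    have : l = [] := by cases l with | nil => rfl | cons c t => simp at hl
    subst this
    rw [nlSplit_no_mem (by simp), scan_line_flush [] (by simp) out]
  | succ n ih =>
    intro l hl out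
    by_cases hnl : '\n' ∈ l
    · set a := l.takeWhile (fun c => !(c = '\n' : Bool)) with ha
      set d := l.dropWhile (fun c => !(c = '\n' : Bool)) with hd
      have had : a ++ d = l := List.takeWhile_append_dropWhile
      have hdne : d ≠ [] := by
        intro h
        have := List.dropWhile_eq_nil_iff.mp (hd ▸ h)
        have := this '\n' hnl
        simp at this
      have hna : '\n' ∉ a := by
        intro hmem
        have := List.mem_takeWhile_imp (ha ▸ hmem)
        simp at this
      obtain ⟨r, hr⟩ : ∃ r, d = '\n' :: r := by
        cases hdd : d with
        | nil => exact absurd hdd hdne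
        | cons x r =>
          have hx := dropWhile_eq_cons_false (fun c => !(c = '\n' : Bool)) l x r
            (by rw [← hd, hdd])
          simp at hx
          exact ⟨r, by rw [hx]⟩
      have hleq : l = a ++ '\n' :: r := by rw [← had, hr]
      have hrlen : r.length ≤ n := by
        have := congrArg List.length hleq
        simp at this
        omega
      rw [hleq]
      have : (a ++ '\n' :: r) ++ ['\n'] = (a ++ ['\n']) ++ (r ++ ['\n']) := by simp
      rw [this, List.foldl_append, scan_line_flush a hna out,
        ih r hrlen, nlSplit_append r hna, fmtLines_cons]
      by_cases he : (PySem.Chars.strip a).isEmpty <;> simp [he, fmtLines]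
    · rw [nlSplit_no_mem hnl, scan_line_flush l hnl out]

-- ===== VERDICT (by name: the statement is the Claim_ definition above) =====
theorem format_prn_for_bat_py_spec : Claim_equal_format_prn_for_bat_py := by
  intro s _
  unfold Spec_format_prn_for_bat_py format_prn_for_bat_py format_prn_for_bat_py_alt
  rw [splitOn_eq_nlSplit,
    scan_main (PySem.Chars.strip s.toList).length _ le_rfl []]
  simp only [ite_self, chain_eq_flatMap_batEsc, foldl_skip_append, List.nil_append]
  simp [fmtLines, List.filter_map, Function.comp_def]
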